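-- pv_equiv track=rewrite | github.com/ruxi22/Bioinformatics | ex2_lab8.py | run_detection
-- ===== SOURCE A (Python) =====
-- def reverse_complement(seq):
--     comp = str.maketrans("ACGT", "TGCA")
--     return seq.translate(comp)[::-1]
--
-- def find_inverted_repeats(seq, min_len=4, max_len=6):
--     irs = []
--     n = len(seq)
--
--     for L in range(min_len, max_len + 1):
--         for i in range(n - L):
--             left = seq[i:i + L]
--             right = reverse_complement(left)
--
--             j = seq.find(right, i + L)
--             if j != -1:
--                 irs.append((i, j, L))
--
--     return irs
--
-- def detect_transposons_from_ir(genome):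
--     irs = find_inverted_repeats(genome, 4, 6)
--     elements = []
--
--     for left, right, L in irs:
--         elements.append({
--             "start": left,
--             "end": right + L,
--             "ir_length": L,
--             "length": (right + L) - left
--         })
--
--     return elements
--
-- def format_output(elements):
--     if not elements:
--         return "No transposable elements detected."
--
--     out = "Detected Transposable Elements:\n\n"
--     for e in elements[:5000]:
--         out += (
--             f"Start: {e['start']}  |  "
--             f"End: {e['end']}  |  "
--             f"IR size: {e['ir_length']}  |  "
--             f"Length: {e['length']}\n"
--         )
--     return out
--
-- def run_detection(fasta_text):
--     if not fasta_text:
--         return "Paste a FASTA sequence first!"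
--
--     lines = fasta_text.splitlines()
--     genome = "".join(l.strip() for l in lines if not l.startswith(">"))
--
--     if len(genome) < 50:
--         return "FASTA too short or invalid."
--
--     elements = detect_transposons_from_ir(genome)
--     return format_output(elements)
-- ===== SOURCE B (Python) =====
-- def run_detection(fasta_text):
--     if not fasta_text:
--         return "Paste a FASTA sequence first!"
--
--     lines = fasta_text.splitlines()
--     genome = "".join(l.strip() for l in lines if not l.startswith(">"))
--
--     if len(genome) < 50:
--         return "FASTA too short or invalid."
--
--     comp = {"A": "T", "C": "G", "G": "C", "T": "A"}
--     n = len(genome)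
--     irs = []
--     for L in range(4, 7):
--         # one backward pass per L: nxt[kmer] = smallest position >= i + L holding kmer
--         nxt = {}
--         hits = []
--         for i in range(n - L - 1, -1, -1):
--             p = i + L
--             if p + L <= n:
--                 nxt[genome[p:p + L]] = p
--             rc = "".join(comp.get(c, c) for c in reversed(genome[i:i + L]))
--             j = nxt.get(rc)
--             if j is not None:
--                 hits.append((i, j))
--         hits.reverse()
--         for i, j in hits:
--             irs.append((i, j, L))
--
--     if not irs:
--         return "No transposable elements detected."
--
--     out = ["Detected Transposable Elements:\n\n"]
--     for i, j, L in irs[:5000]: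
--         out.append(
--             f"Start: {i}  |  "
--             f"End: {j + L}  |  "
--             f"IR size: {L}  |  "
--             f"Length: {j + L - i}\n"
--         )
--     return "".join(out)
-- ===== Notes on version B (the rewrite author's own statement) =====
-- stated objective: faster
-- what changed: A calls seq.find(reverse_complement, i+L) for every position i (a linear scan per position); B instead makes, for each window size L, one backward pass over the genome maintaining a dict mapping each L-mer to its smallest position >= i+L, so each query is a single dict lookup.
import Mathlib
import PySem

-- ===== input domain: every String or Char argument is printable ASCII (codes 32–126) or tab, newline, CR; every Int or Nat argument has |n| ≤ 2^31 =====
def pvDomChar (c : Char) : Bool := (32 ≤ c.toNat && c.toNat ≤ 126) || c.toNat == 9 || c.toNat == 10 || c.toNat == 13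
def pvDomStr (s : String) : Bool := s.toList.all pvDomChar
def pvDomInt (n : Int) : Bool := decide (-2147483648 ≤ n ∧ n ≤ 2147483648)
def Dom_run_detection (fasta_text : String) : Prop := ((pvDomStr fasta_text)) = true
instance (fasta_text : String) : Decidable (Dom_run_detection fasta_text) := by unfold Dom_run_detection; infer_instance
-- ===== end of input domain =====

-- B replaces A's per-position seq.find scan by, for each L, one backward pass that maintains a
-- dict mapping each L-mer to its first occurrence at position ≥ i+L (objective: faster).

-- ===== PORT A =====

-- str.maketrans("ACGT","TGCA") + str.translate, ported by hand char-by-char (exact: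
-- translate leaves characters outside the table unchanged)
def pvTransACGT (c : Char) : Char :=
  if c = 'A' then 'T' else if c = 'C' then 'G' else if c = 'G' then 'C'
  else if c = 'T' then 'A' else c

-- seq.translate(comp)[::-1]
def reverse_complement (seq : List Char) : List Char :=
  (PySem.List.slice? (seq.map pvTransACGT) none none (-1)).getD []

def find_inverted_repeats (seq : List Char) (min_len max_len : Int) : List (Int × Int × Int) :=
  let n : Int := PySem.List.len seq
  (PySem.List.pyRange min_len (max_len + 1)).foldl (fun irs L =>
    (PySem.List.pyRange 0 (n - L)).foldl (fun irs i =>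
      let left := PySem.List.slice seq (some i) (some (i + L))
      let right := reverse_complement left
      let j := PySem.Chars.findFrom seq right (i + L)
      if j ≠ -1 then irs ++ [(i, j, L)] else irs) irs) []

def detect_transposons_from_ir (genome : List Char) : List (PySem.Dict String Int) :=
  let irs := find_inverted_repeats genome 4 6
  irs.foldl (fun elements t =>
    elements ++ [((((PySem.Dict.empty.insert "start" t.1).insert "end" (t.2.1 + t.2.2)).insert
        "ir_length" t.2.2).insert "length" ((t.2.1 + t.2.2) - t.1))]) []

-- e['start'] etc. ported as getD (exact: the four keys are always present in the dicts built above)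
def format_output (elements : List (PySem.Dict String Int)) : List Char :=
  if elements = [] then "No transposable elements detected.".toList
  else
    (PySem.List.slice elements none (some 5000)).foldl (fun out e =>
      out ++ ("Start: ".toList ++ PySem.Int.toChars (e.getD "start" 0)
          ++ "  |  End: ".toList ++ PySem.Int.toChars (e.getD "end" 0)
          ++ "  |  IR size: ".toList ++ PySem.Int.toChars (e.getD "ir_length" 0)
          ++ "  |  Length: ".toList ++ PySem.Int.toChars (e.getD "length" 0) ++ "\n".toList))
      "Detected Transposable Elements:\n\n".toList

def run_detection (fasta_text : String) : String :=
  if fasta_text.toList = [] then "Paste a FASTA sequence first!"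
  else
    let lines := PySem.Chars.splitlines fasta_text.toList
    let genome := PySem.Chars.join []
      ((lines.filter (fun l => !(PySem.Chars.startswith l ['>']))).map PySem.Chars.strip)
    if PySem.Chars.len genome < 50 then "FASTA too short or invalid."
    else String.ofList (format_output (detect_transposons_from_ir genome))

-- ===== PORT B =====

-- comp = {"A": "T", "C": "G", "G": "C", "T": "A"}
def pvCompDict : PySem.Dict Char Char :=
  (((PySem.Dict.empty.insert 'A' 'T').insert 'C' 'G').insert 'G' 'C').insert 'T' 'A'

-- 'j = nxt.get(rc); if j is not None: hits.append((i, j))' is ported with Option.elim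
def run_detection_alt (fasta_text : String) : String :=
  if fasta_text.toList = [] then "Paste a FASTA sequence first!"
  else
    let lines := PySem.Chars.splitlines fasta_text.toList
    let genome := PySem.Chars.join []
      ((lines.filter (fun l => !(PySem.Chars.startswith l ['>']))).map PySem.Chars.strip)
    if PySem.Chars.len genome < 50 then "FASTA too short or invalid."
    else
      let n : Int := PySem.List.len genome
      let irs := (PySem.List.pyRange 4 7).foldl (fun irs L =>
        let st := (PySem.List.pyRange (n - L - 1) (-1) (-1)).foldl
          (fun (st : PySem.Dict (List Char) Int × List (Int × Int)) i =>
            let nxt := if i + L + L ≤ n then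
                st.1.insert (PySem.List.slice genome (some (i + L)) (some (i + L + L))) (i + L)
              else st.1
            (nxt, (nxt.get? (((PySem.List.slice genome (some i) (some (i + L))).reverse).map
                (fun c => pvCompDict.getD c c))).elim st.2 (fun j => st.2 ++ [(i, j)])))
          (PySem.Dict.empty, [])
        irs ++ (st.2.reverse).map (fun ij => (ij.1, ij.2, L))) []
      if irs = [] then "No transposable elements detected."
      else
        let out := (PySem.List.slice irs none (some 5000)).foldl (fun out t =>
          out ++ [("Start: ".toList ++ PySem.Int.toChars t.1
              ++ "  |  End: ".toList ++ PySem.Int.toChars (t.2.1 + t.2.2)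
              ++ "  |  IR size: ".toList ++ PySem.Int.toChars t.2.2
              ++ "  |  Length: ".toList ++ PySem.Int.toChars (t.2.1 + t.2.2 - t.1) ++ "\n".toList)])
          ["Detected Transposable Elements:\n\n".toList]
        String.ofList (PySem.Chars.join [] out)

-- ===== PRECONDITION & SPEC =====
def Spec_run_detection (fasta_text : String) (out : String) : Prop := out = run_detection_alt fasta_text
instance (fasta_text : String) (out : String) : Decidable (Spec_run_detection fasta_text out) := by unfold Spec_run_detection; infer_instance

-- ===== CLAIM (what is proved, stated in full; the proofs are below) =====
def Claim_equal_run_detection : Prop := ∀ (fasta_text : String), Dom_run_detection fasta_text → Spec_run_detection fasta_text (run_detection fasta_text)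

-- ===== LEMMAS AND PROOFS =====

-- the L-mer of g at position q
def pvKmer (g : List Char) (L q : Int) : List Char :=
  PySem.List.slice g (some q) (some (q + L))

-- A's 'right' for position i
def pvRC (g : List Char) (L i : Int) : List Char := reverse_complement (pvKmer g L i)

-- first position q ≥ i+L whose L-mer equals the reverse complement of the L-mer at i
def pvFirst (g : List Char) (L i : Int) : Option Int :=
  (PySem.List.pyRange (i + L) (PySem.List.len g - L + 1)).find?
    (fun q => pvKmer g L q == pvRC g L i)

-- the (i, j) hit pairs for window size L, ascending in i
def pvHits (g : List Char) (L : Int) : List (Int × Int) :=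
  (PySem.List.pyRange 0 (PySem.List.len g - L)).filterMap
    (fun i => (pvFirst g L i).map (fun j => (i, j)))

theorem pvComp_eq (c : Char) : pvCompDict.getD c c = pvTransACGT c := by
  by_cases hA : c = 'A' <;> by_cases hC : c = 'C' <;> by_cases hG : c = 'G' <;>
    by_cases hT : c = 'T' <;>
    simp_all [pvCompDict, pvTransACGT, PySem.Dict.getD, PySem.Dict.get?_insert_self,
      PySem.Dict.get?_insert_of_ne, PySem.Dict.get?_empty]

theorem pvRC_eq (g : List Char) (L i : Int) :
    ((PySem.List.slice g (some i) (some (i + L))).reverse).map (fun c => pvCompDict.getD c c)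
      = pvRC g L i := by
  unfold pvRC reverse_complement pvKmer
  rw [PySem.List.slice?_none_none_neg_one]
  simp [List.map_reverse, pvComp_eq]

theorem pvKmer_length (g : List Char) {L q : Int} (h0 : 0 ≤ q) (hL : 0 ≤ L)
    (h : q + L ≤ PySem.List.len g) : (pvKmer g L q).length = L.toNat := by
  unfold pvKmer
  rw [PySem.List.slice_toNat g h0 (by omega)]
  rw [PySem.List.len_eq] at h
  simp only [List.length_take, List.length_drop]
  omega

theorem pvRC_length (g : List Char) (L i : Int) : (pvRC g L i).length = (pvKmer g L i).length := by
  unfold pvRC reverse_complement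
  rw [PySem.List.slice?_none_none_neg_one]
  simp

theorem pvMatch_iff (g : List Char) {L i q : Int} (hL : 0 < L) (h0 : 0 ≤ i)
    (hi : i < PySem.List.len g - L) (hq : 0 ≤ q) :
    pvKmer g L q = pvRC g L i ↔ pvRC g L i <+: g.drop q.toNat := by
  have hrcl : (pvRC g L i).length = L.toNat := by
    rw [pvRC_length]; exact pvKmer_length g h0 (by omega) (by omega)
  constructor
  · intro hk
    rw [← hk]
    unfold pvKmer
    rw [PySem.List.slice_toNat g hq (by omega)]
    exact List.take_prefix _ _
  · intro hpre
    unfold pvKmer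
    rw [PySem.List.slice_toNat g hq (by omega)]
    rw [List.prefix_iff_eq_take, hrcl] at hpre
    rw [show (q + L).toNat - q.toNat = L.toNat by omega]
    exact hpre.symm

theorem pvPrefix_bound (g : List Char) {L i q : Int} (hL : 0 < L) (h0 : 0 ≤ i)
    (hi : i < PySem.List.len g - L) (hq : 0 ≤ q)
    (hpre : pvRC g L i <+: g.drop q.toNat) : q + L ≤ PySem.List.len g := by
  have hrcl : (pvRC g L i).length = L.toNat := by
    rw [pvRC_length]; exact pvKmer_length g h0 (by omega) (by omega)
  have hle := hpre.length_le
  rw [List.length_drop, hrcl] at hle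
  rw [PySem.List.len_eq]
  omega

theorem pvFind?_first_aux (p : Int → Bool) :
    ∀ (m : Nat) (a b j : Int), (j - a).toNat = m → a ≤ j → j < b → p j = true →
      (∀ q, a ≤ q → q < j → p q = false) →
      (PySem.List.pyRange a b).find? p = some j := by
  intro m
  induction m with
  | zero =>
    intro a b j hm h1 h2 hp hmin
    have haj : a = j := by omega
    subst haj
    rw [PySem.List.pyRange_one_cons h2]
    rw [List.find?_cons_of_pos hp]
  | succ k ih =>
    intro a b j hm h1 h2 hp hmin
    have haj : a < j := by omega
    rw [PySem.List.pyRange_one_cons (by omega : a < b)]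
    rw [List.find?_cons_of_neg (by simp [hmin a le_rfl haj])]
    exact ih (a + 1) b j (by omega) (by omega) h2 hp (fun q hq1 hq2 => hmin q (by omega) hq2)

theorem pvFirst_eq_findFrom (g : List Char) {L i : Int} (hL : 0 < L) (h0 : 0 ≤ i)
    (hi : i < PySem.List.len g - L) :
    pvFirst g L i =
      (if PySem.Chars.findFrom g (pvRC g L i) (i + L) = -1 then none
       else some (PySem.Chars.findFrom g (pvRC g L i) (i + L))) := by
  have hlen : PySem.List.len g = (g.length : Int) := PySem.List.len_eq g
  have hk : (((i + L).toNat : Nat) : Int) = i + L := by omega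
  have hkle : (i + L).toNat ≤ g.length := by omega
  by_cases hf : PySem.Chars.findFrom g (pvRC g L i) (i + L) = -1
  · rw [if_pos hf]
    rw [← hk] at hf
    have hninf := (PySem.Chars.findFrom_natCast_eq_neg_one_iff g (pvRC g L i) _ hkle).mp hf
    unfold pvFirst
    rw [List.find?_eq_none]
    intro q hqmem hpq
    rw [PySem.List.mem_pyRange_one] at hqmem
    have hq0 : (0:Int) ≤ q := by omega
    have hkq : pvKmer g L q = pvRC g L i := by simpa using hpq
    have hpre := (pvMatch_iff g hL h0 hi hq0).mp hkq
    apply hninf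
    have hdrop : g.drop q.toNat = (g.drop (i + L).toNat).drop (q.toNat - (i + L).toNat) := by
      rw [List.drop_drop]
      congr 1
      omega
    rw [hdrop] at hpre
    exact hpre.isInfix.trans (List.drop_suffix _ _).isInfix
  · rw [if_neg hf]
    rw [← hk] at hf ⊢
    obtain ⟨hj1, hj2, hj3⟩ := PySem.Chars.findFrom_natCast_spec g (pvRC g L i) _ hkle hf
    have hj0 : (0:Int) ≤ PySem.Chars.findFrom g (pvRC g L i) ((((i + L).toNat : Nat)) : Int) := by
      omega
    have hjt : ((PySem.Chars.findFrom g (pvRC g L i) ((((i + L).toNat : Nat)) : Int)).toNat : Int)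
        = PySem.Chars.findFrom g (pvRC g L i) ((((i + L).toNat : Nat)) : Int) := by omega
    have hpre : pvRC g L i <+:
        g.drop (PySem.Chars.findFrom g (pvRC g L i) ((((i + L).toNat : Nat)) : Int)).toNat := hj2
    have hjb := pvPrefix_bound g hL h0 hi hj0 hpre
    unfold pvFirst
    apply pvFind?_first_aux _
      ((PySem.Chars.findFrom g (pvRC g L i) ((((i + L).toNat : Nat)) : Int) - (i + L)).toNat)
      _ _ _ rfl (by omega) (by omega)
    · have hkq : pvKmer g L _ = pvRC g L i := (pvMatch_iff g hL h0 hi hj0).mpr hpre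
      simpa using hkq
    · intro q hq1 hq2
      by_contra hcon
      have hpq : (pvKmer g L q == pvRC g L i) = true := by
        cases hval : (pvKmer g L q == pvRC g L i)
        · exact absurd hval hcon
        · rfl
      have hq0 : (0:Int) ≤ q := by omega
      have hqpre := (pvMatch_iff g hL h0 hi hq0).mp (by simpa using hpq)
      exact hj3 q.toNat (by omega) (by omega) hqpre

theorem pvFoldl_append_opt {α β : Type} (o : α → Option β) (l : List α) (acc : List β) :
    l.foldl (fun acc x => acc ++ (o x).toList) acc = acc ++ l.filterMap o := by
  rw [PySem.List.foldl_append_eq_flatMap]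
  rw [List.filterMap_eq_flatMap_toList]

theorem pvInnerA (g : List Char) {L : Int} (hL : 0 < L) (irs : List (Int × Int × Int)) :
    (PySem.List.pyRange 0 (PySem.List.len g - L)).foldl (fun irs i =>
      if PySem.Chars.findFrom g
          (reverse_complement (PySem.List.slice g (some i) (some (i + L)))) (i + L) ≠ -1
      then irs ++ [(i, PySem.Chars.findFrom g
          (reverse_complement (PySem.List.slice g (some i) (some (i + L)))) (i + L), L)]
      else irs) irs
    = irs ++ (pvHits g L).map (fun ij => (ij.1, ij.2, L)) := by
  have hstep : ∀ (acc : List (Int × Int × Int)),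
      ∀ i ∈ PySem.List.pyRange 0 (PySem.List.len g - L),
      (fun irs i =>
        if PySem.Chars.findFrom g
            (reverse_complement (PySem.List.slice g (some i) (some (i + L)))) (i + L) ≠ -1
        then irs ++ [(i, PySem.Chars.findFrom g
            (reverse_complement (PySem.List.slice g (some i) (some (i + L)))) (i + L), L)]
        else irs) acc i
      = (fun irs i => irs ++ ((pvFirst g L i).map (fun j => (i, j, L))).toList) acc i := by
    intro acc i hmem
    rw [PySem.List.mem_pyRange_one] at hmem
    have hrw : reverse_complement (PySem.List.slice g (some i) (some (i + L))) = pvRC g L i := rfl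
    dsimp only
    rw [hrw, pvFirst_eq_findFrom g hL hmem.1 hmem.2]
    by_cases hfv : PySem.Chars.findFrom g (pvRC g L i) (i + L) = -1
    · simp [hfv]
    · simp [hfv]
  rw [PySem.List.foldl_congr_mem _ _
    (fun irs i => irs ++ ((pvFirst g L i).map (fun j => (i, j, L))).toList) irs hstep]
  rw [pvFoldl_append_opt]
  unfold pvHits
  rw [List.map_filterMap]
  simp only [Option.map_map]
  rfl

theorem pvLoopB (g : List Char) {L : Int} (hL : 0 < L) :
    ∀ (m : Nat), ∀ (i0 : Int), i0 + 1 = (m : Int) → i0 ≤ PySem.List.len g - L - 1 →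
    ∀ (d : PySem.Dict (List Char) Int) (hits0 : List (Int × Int)),
    (∀ k, d.get? k = (PySem.List.pyRange (i0 + 1 + L) (PySem.List.len g - L + 1)).find?
        (fun q => pvKmer g L q == k)) →
    ((PySem.List.pyRange i0 (-1) (-1)).foldl
      (fun (st : PySem.Dict (List Char) Int × List (Int × Int)) i =>
        let nxt := if i + L + L ≤ PySem.List.len g then
            st.1.insert (PySem.List.slice g (some (i + L)) (some (i + L + L))) (i + L)
          else st.1
        (nxt, (nxt.get? (((PySem.List.slice g (some i) (some (i + L))).reverse).map
            (fun c => pvCompDict.getD c c))).elim st.2 (fun j => st.2 ++ [(i, j)])))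
      (d, hits0)).2
    = hits0 ++ ((PySem.List.pyRange 0 (i0 + 1)).filterMap
        (fun i => (pvFirst g L i).map (fun j => (i, j)))).reverse := by
  intro m
  induction m with
  | zero =>
    intro i0 hm hub d hits0 hinv
    have hneg : i0 = -1 := by omega
    subst hneg
    rw [PySem.List.pyRange_neg_one_eq_nil le_rfl]
    rw [PySem.List.pyRange_one_eq_nil (by omega : (-1:Int) + 1 ≤ 0)]
    simp
  | succ k ih =>
    intro i0 hm hub d hits0 hinv
    have h00 : (0:Int) ≤ i0 := by omega
    rw [PySem.List.pyRange_neg_one_cons (by omega : (-1:Int) < i0)]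
    rw [List.foldl_cons]
    dsimp only
    rw [pvRC_eq g L i0]
    have hnxt : ∀ k', (if i0 + L + L ≤ PySem.List.len g then
        d.insert (PySem.List.slice g (some (i0 + L)) (some (i0 + L + L))) (i0 + L) else d).get? k'
        = (PySem.List.pyRange (i0 + L) (PySem.List.len g - L + 1)).find?
            (fun q => pvKmer g L q == k') := by
      intro k'
      by_cases hcond : i0 + L + L ≤ PySem.List.len g
      · rw [if_pos hcond]
        rw [PySem.List.pyRange_one_cons (by omega : i0 + L < PySem.List.len g - L + 1)]
        by_cases hkey : k' = pvKmer g L (i0 + L)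
        · subst hkey
          rw [List.find?_cons_of_pos (by simp)]
          rw [show pvKmer g L (i0 + L)
              = PySem.List.slice g (some (i0 + L)) (some (i0 + L + L)) from rfl]
          rw [PySem.Dict.get?_insert_self]
        · rw [List.find?_cons_of_neg (by simp [Ne.symm hkey])]
          rw [show PySem.List.slice g (some (i0 + L)) (some (i0 + L + L))
              = pvKmer g L (i0 + L) from rfl]
          rw [PySem.Dict.get?_insert_of_ne _ _ hkey]
          rw [hinv k']
          rw [show i0 + 1 + L = i0 + L + 1 by ring]
      · rw [if_neg hcond]
        rw [hinv k']
        rw [PySem.List.pyRange_one_eq_nil (by omega), PySem.List.pyRange_one_eq_nil (by omega)]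
    rw [hnxt (pvRC g L i0)]
    rw [show (PySem.List.pyRange (i0 + L) (PySem.List.len g - L + 1)).find?
        (fun q => pvKmer g L q == pvRC g L i0) = pvFirst g L i0 from rfl]
    have hinv' : ∀ k', (if i0 + L + L ≤ PySem.List.len g then
        d.insert (PySem.List.slice g (some (i0 + L)) (some (i0 + L + L))) (i0 + L) else d).get? k'
        = (PySem.List.pyRange (i0 - 1 + 1 + L) (PySem.List.len g - L + 1)).find?
            (fun q => pvKmer g L q == k') := by
      intro k'
      rw [hnxt k']
      rw [show i0 - 1 + 1 + L = i0 + L by ring]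
    rcases hfst : pvFirst g L i0 with _ | j
    · simp only [Option.elim_none]
      rw [ih (i0 - 1) (by omega) (by omega) _ hits0 hinv']
      rw [show i0 - 1 + 1 = i0 by ring]
      rw [PySem.List.pyRange_one_succ_right h00]
      simp [hfst]
    · simp only [Option.elim_some]
      rw [ih (i0 - 1) (by omega) (by omega) _ (hits0 ++ [(i0, j)]) hinv']
      rw [show i0 - 1 + 1 = i0 by ring]
      rw [PySem.List.pyRange_one_succ_right h00]
      simp [hfst]

theorem pvInnerB (g : List Char) {L : Int} (hL : 0 < L) (hLn : L ≤ PySem.List.len g)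
    (irs : List (Int × Int × Int)) :
    (irs ++ ((((PySem.List.pyRange (PySem.List.len g - L - 1) (-1) (-1)).foldl
      (fun (st : PySem.Dict (List Char) Int × List (Int × Int)) i =>
        let nxt := if i + L + L ≤ PySem.List.len g then
            st.1.insert (PySem.List.slice g (some (i + L)) (some (i + L + L))) (i + L)
          else st.1
        (nxt, (nxt.get? (((PySem.List.slice g (some i) (some (i + L))).reverse).map
            (fun c => pvCompDict.getD c c))).elim st.2 (fun j => st.2 ++ [(i, j)])))
      (PySem.Dict.empty, [])).2.reverse).map (fun ij => (ij.1, ij.2, L))))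
    = irs ++ (pvHits g L).map (fun ij => (ij.1, ij.2, L)) := by
  have hinv0 : ∀ k, (PySem.Dict.empty : PySem.Dict (List Char) Int).get? k
      = (PySem.List.pyRange (PySem.List.len g - L - 1 + 1 + L)
          (PySem.List.len g - L + 1)).find? (fun q => pvKmer g L q == k) := by
    intro k
    rw [PySem.Dict.get?_empty]
    rw [PySem.List.pyRange_one_eq_nil (by omega)]
    rfl
  rw [pvLoopB g hL ((PySem.List.len g - L).toNat) (PySem.List.len g - L - 1) (by omega) (by omega)
    PySem.Dict.empty [] hinv0]
  rw [show PySem.List.len g - L - 1 + 1 = PySem.List.len g - L by ring]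
  rw [show (PySem.List.pyRange 0 (PySem.List.len g - L)).filterMap
      (fun i => (pvFirst g L i).map (fun j => (i, j))) = pvHits g L from rfl]
  simp

theorem pvCore_eq (g : List Char) (hn : 50 ≤ PySem.List.len g) :
    find_inverted_repeats g 4 6
      = (PySem.List.pyRange 4 7).foldl (fun irs L =>
          irs ++ ((((PySem.List.pyRange (PySem.List.len g - L - 1) (-1) (-1)).foldl
            (fun (st : PySem.Dict (List Char) Int × List (Int × Int)) i =>
              let nxt := if i + L + L ≤ PySem.List.len g then
                  st.1.insert (PySem.List.slice g (some (i + L)) (some (i + L + L))) (i + L)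
                else st.1
              (nxt, (nxt.get? (((PySem.List.slice g (some i) (some (i + L))).reverse).map
                  (fun c => pvCompDict.getD c c))).elim st.2 (fun j => st.2 ++ [(i, j)])))
            (PySem.Dict.empty, [])).2.reverse).map (fun ij => (ij.1, ij.2, L)))) [] := by
  have h47 : (PySem.List.pyRange 4 7 : List Int) = [4, 5, 6] := by decide
  have h467 : (PySem.List.pyRange 4 (6 + 1) : List Int) = [4, 5, 6] := by decide
  unfold find_inverted_repeats
  dsimp only
  rw [h47, h467]
  simp only [List.foldl_cons, List.foldl_nil]
  rw [pvInnerA g (by norm_num : (0:Int) < 4), pvInnerA g (by norm_num : (0:Int) < 5),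
    pvInnerA g (by norm_num : (0:Int) < 6)]
  rw [pvInnerB g (by norm_num : (0:Int) < 4) (by omega),
    pvInnerB g (by norm_num : (0:Int) < 5) (by omega),
    pvInnerB g (by norm_num : (0:Int) < 6) (by omega)]

theorem pvJoin_nil_eq_flatten (l : List (List Char)) : PySem.Chars.join [] l = l.flatten := by
  induction l with
  | nil => simp [PySem.Chars.join_nil]
  | cons x t ih =>
    cases t with
    | nil => simp [PySem.Chars.join_singleton]
    | cons y r =>
      rw [PySem.Chars.join_cons_cons]
      rw [ih]
      simp

theorem pvFormat_eq (irs : List (Int × Int × Int)) :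
    format_output (irs.foldl (fun elements t =>
      elements ++ [((((PySem.Dict.empty.insert "start" t.1).insert "end" (t.2.1 + t.2.2)).insert
          "ir_length" t.2.2).insert "length" ((t.2.1 + t.2.2) - t.1))]) [])
    = (if irs = [] then "No transposable elements detected.".toList
       else PySem.Chars.join []
        ((PySem.List.slice irs none (some 5000)).foldl (fun out t =>
          out ++ [("Start: ".toList ++ PySem.Int.toChars t.1
              ++ "  |  End: ".toList ++ PySem.Int.toChars (t.2.1 + t.2.2)
              ++ "  |  IR size: ".toList ++ PySem.Int.toChars t.2.2
              ++ "  |  Length: ".toList ++ PySem.Int.toChars (t.2.1 + t.2.2 - t.1)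
              ++ "\n".toList)])
          ["Detected Transposable Elements:\n\n".toList])) := by
  rw [PySem.List.foldl_append_singleton_eq_map]
  rw [List.nil_append]
  unfold format_output
  by_cases hnil : irs = []
  · subst hnil
    simp
  · rw [if_neg (by simp [hnil]), if_neg hnil]
    rw [PySem.List.slice_to _ (by norm_num : (0:Int) ≤ 5000)]
    rw [PySem.List.slice_to _ (by norm_num : (0:Int) ≤ 5000)]
    rw [← List.map_take]
    rw [List.foldl_map]
    rw [PySem.List.foldl_append_singleton_eq_map]
    rw [pvJoin_nil_eq_flatten]
    simp only [PySem.Dict.getD, PySem.Dict.get?_insert_self,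
      PySem.Dict.get?_insert_of_ne _ _ (by decide : ("ir_length":String) ≠ "length"),
      PySem.Dict.get?_insert_of_ne _ _ (by decide : ("end":String) ≠ "length"),
      PySem.Dict.get?_insert_of_ne _ _ (by decide : ("start":String) ≠ "length"),
      PySem.Dict.get?_insert_of_ne _ _ (by decide : ("end":String) ≠ "ir_length"),
      PySem.Dict.get?_insert_of_ne _ _ (by decide : ("start":String) ≠ "ir_length"),
      PySem.Dict.get?_insert_of_ne _ _ (by decide : ("start":String) ≠ "end"),
      Option.getD_some]
    rw [PySem.List.foldl_append_eq_flatMap]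
    rw [List.flatten_append, List.flatten_cons, List.flatten_nil, List.append_nil]
    rw [← List.flatMap_def]

-- ===== VERDICT (by name: the statement is the Claim_ definition above) =====
theorem run_detection_spec : Claim_equal_run_detection := by
  intro s _hdom
  unfold Spec_run_detection run_detection run_detection_alt
  by_cases h0 : s.toList = []
  · rw [if_pos h0, if_pos h0]
  · rw [if_neg h0, if_neg h0]
    dsimp only
    by_cases h50 : PySem.Chars.len (PySem.Chars.join []
        (((PySem.Chars.splitlines s.toList).filter
          (fun l => !(PySem.Chars.startswith l ['>']))).map PySem.Chars.strip)) < 50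
    · rw [if_pos h50, if_pos h50]
    · rw [if_neg h50, if_neg h50]
      have hn : 50 ≤ PySem.List.len (PySem.Chars.join []
          (((PySem.Chars.splitlines s.toList).filter
            (fun l => !(PySem.Chars.startswith l ['>']))).map PySem.Chars.strip)) := by
        have h := not_lt.mp h50
        rw [PySem.Chars.len_eq] at h
        rw [PySem.List.len_eq]
        exact h
      unfold detect_transposons_from_ir
      dsimp only
      rw [pvFormat_eq]
      rw [← pvCore_eq _ hn]
      split_ifs with hirs
      · simp
      · rfl
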